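-- pv_equiv track=rewrite | github.com/C4rr13rX/W1z4rDV1510n | scripts/train_conversations.py | _tokenize_chars
-- ===== SOURCE A (Python) =====
-- def _tokenize_chars(text: str) -> list[str]:
--     """Split text into a stream of atomic token-frames: alnum runs (words) and
--     each non-alnum character (space, comma, period, etc.) as its own frame.
--
--     'Hello, world!' → ['Hello', ',', ' ', 'world', '!']
--
--     Every space and punctuation character gets its own frame and its own
--     timestamp so temporal STDP creates directional edges between word → space
--     → word, word → comma → space → word, etc. — per the bottom-up architecture
--     where every character is a neuron.
--     """
--     tokens: list[str] = []
--     buf: list[str] = []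
--     for ch in text:
--         if ch.isalnum():
--             buf.append(ch)
--         else:
--             if buf:
--                 tokens.append("".join(buf))
--                 buf = []
--             tokens.append(ch)  # space, comma, period — each its own frame
--     if buf:
--         tokens.append("".join(buf))
--     return tokens
-- ===== SOURCE B (Python) =====
-- from itertools import groupby
--
-- def _tokenize_chars(text: str) -> list[str]:
--     tokens: list[str] = []
--     for is_word, group in groupby(text, key=str.isalnum):
--         if is_word:
--             tokens.append("".join(group))
--         else:
--             tokens.extend(group)
--     return tokens
-- ===== Notes on version B (the rewrite author's own statement) =====
-- stated objective: idiomatic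
-- what changed: Replaced the manual buffer-and-flush loop with itertools.groupby keyed on str.isalnum: alnum groups are joined into one token, non-alnum groups are emitted character by character; no running buffer is kept.
import Mathlib
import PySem

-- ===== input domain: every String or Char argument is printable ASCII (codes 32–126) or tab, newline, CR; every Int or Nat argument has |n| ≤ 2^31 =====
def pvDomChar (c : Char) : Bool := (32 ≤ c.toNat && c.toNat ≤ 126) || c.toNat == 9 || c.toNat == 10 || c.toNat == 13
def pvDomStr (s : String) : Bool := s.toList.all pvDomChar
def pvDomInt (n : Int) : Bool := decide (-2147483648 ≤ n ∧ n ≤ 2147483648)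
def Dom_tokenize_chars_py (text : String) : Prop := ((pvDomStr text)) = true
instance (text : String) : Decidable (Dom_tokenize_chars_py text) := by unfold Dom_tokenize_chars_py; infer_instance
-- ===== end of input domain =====

-- B groups the characters with a groupby-style recursion instead of A's buffer-and-flush loop (idiomatic, same cost).

-- ===== PORT A =====
-- A's for-loop over the characters carrying the state (tokens, buf), transcribed as structural recursion over the same state.
def tokenizeA : List Char → List Char → List String
  | [], buf => if buf.isEmpty then [] else [String.ofList buf]
  | c :: rest, buf =>
    if PySem.Chars.isalnum c then
      tokenizeA rest (buf ++ [c])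
    else
      (if buf.isEmpty then [] else [String.ofList buf]) ++ [String.ofList [c]] ++ tokenizeA rest []

def tokenize_chars_py (text : String) : List String := tokenizeA text.toList []

-- ===== PORT B =====
-- groupby(text, key=str.isalnum): a True group becomes one joined token, each char of a False group its own token.
def tokenizeB : List Char → List String
  | [] => []
  | c :: rest =>
    if PySem.Chars.isalnum c then
      String.ofList (c :: rest.takeWhile PySem.Chars.isalnum) :: tokenizeB (rest.dropWhile PySem.Chars.isalnum)
    else
      String.ofList [c] :: tokenizeB rest
termination_by cs => cs.length
decreasing_by
  · exact Nat.lt_succ_of_le (List.length_dropWhile_le _ _)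
  · exact Nat.lt_succ_self _

def tokenize_chars_py_alt (text : String) : List String := tokenizeB text.toList

-- ===== PRECONDITION & SPEC =====
def Spec_tokenize_chars_py (text : String) (out : List String) : Prop := out = tokenize_chars_py_alt text
instance (text : String) (out : List String) : Decidable (Spec_tokenize_chars_py text out) := by unfold Spec_tokenize_chars_py; infer_instance

-- ===== CLAIM (what is proved, stated in full; the proofs are below) =====
def Claim_equal_tokenize_chars_py : Prop := ∀ (text : String), Dom_tokenize_chars_py text → Spec_tokenize_chars_py text (tokenize_chars_py text)

-- ===== LEMMAS AND PROOFS =====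

theorem takeWhile_all_append {p : Char → Bool} (buf : List Char) (c : Char) (rest : List Char)
    (hb : ∀ b ∈ buf, p b = true) (hc : p c = false) :
    (buf ++ c :: rest).takeWhile p = buf ∧ (buf ++ c :: rest).dropWhile p = c :: rest := by
  induction buf with
  | nil => simp [hc]
  | cons b bs ih =>
    have hb' := hb b (by simp)
    have := ih (fun x hx => hb x (by simp [hx]))
    simp [hb', this.1, this.2]

-- Invariant: A's loop with an all-alnum buffer buf computes B's tokenization of buf ++ cs.
theorem tokenizeA_eq (cs : List Char) : ∀ (buf : List Char),
    (∀ b ∈ buf, PySem.Chars.isalnum b = true) → tokenizeA cs buf = tokenizeB (buf ++ cs) := by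
  induction cs with
  | nil =>
    intro buf hb
    cases hbuf : buf with
    | nil => simp [tokenizeA, tokenizeB]
    | cons b bs =>
      subst hbuf
      have hb' := hb b (by simp)
      have htw : bs.takeWhile PySem.Chars.isalnum = bs :=
        List.takeWhile_eq_self_iff.mpr (fun x hx => hb x (by simp [hx]))
      have hdw : bs.dropWhile PySem.Chars.isalnum = [] :=
        List.dropWhile_eq_nil_iff.mpr (fun x hx => by simp [hb x (by simp [hx])])
      simp [tokenizeA, tokenizeB, hb', htw, hdw]
  | cons c rest ih =>
    intro buf hb
    by_cases hc : PySem.Chars.isalnum c = true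
    · have hball : ∀ x ∈ buf ++ [c], PySem.Chars.isalnum x = true := by
        intro x hx
        rcases List.mem_append.mp hx with h | h
        · exact hb x h
        · simp at h; subst h; exact hc
      rw [tokenizeA, if_pos hc, ih (buf ++ [c]) hball]
      simp
    · have hcf : PySem.Chars.isalnum c = false := by simpa using hc
      rw [tokenizeA, if_neg (by simp [hcf])]
      cases hbuf : buf with
      | nil =>
        simp [tokenizeB, hcf, ih [] (by simp)]
      | cons b bs =>
        subst hbuf
        have hb' := hb b (by simp)
        have h := takeWhile_all_append (p := PySem.Chars.isalnum) bs c rest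
          (fun x hx => hb x (by simp [hx])) hcf
        rw [show ((b :: bs) ++ c :: rest) = b :: (bs ++ c :: rest) by simp, tokenizeB]
        rw [if_pos hb', h.1, h.2, tokenizeB]
        simp [hcf, ih [] (by simp)]

-- ===== VERDICT (by name: the statement is the Claim_ definition above) =====
theorem tokenize_chars_py_spec : Claim_equal_tokenize_chars_py := by
  intro text _
  unfold Spec_tokenize_chars_py tokenize_chars_py tokenize_chars_py_alt
  simpa using tokenizeA_eq text.toList [] (by simp)
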